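-- pv_equiv track=rewrite | github.com/sn0wf1llin/tg | parameters_extractor/metrics/additional_options.py | n_symbols
-- ===== SOURCE A (Python) =====
-- def n_symbols(text, numbers=False, letters=False, symbols=False, others=False):
-- 	if numbers:
--
-- 		return sum(c.isdigit() for c in text)
-- 	elif letters:
--
-- 		return sum(c.isalpha() for c in text)
-- 	elif symbols:
--
-- 		return sum(c.isalpha() for c in text) + sum(c.isspace() for c in text)
-- 	elif others:
-- 		numbers = sum(c.isdigit() for c in text)
-- 		words = sum(c.isalpha() for c in text)
-- 		spaces = sum(c.isspace() for c in text)
-- 		others = len(text) - numbers - words - spaces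
--
-- 		return others
-- 	else:
-- 		return None
-- ===== SOURCE B (Python) =====
-- def n_symbols(text, numbers=False, letters=False, symbols=False, others=False):
--     # One linear pass accumulating all three counters, then dispatch on the flags.
--     d = a = s = 0
--     for c in text:
--         if c.isdigit():
--             d += 1
--         if c.isalpha():
--             a += 1
--         if c.isspace():
--             s += 1
--     if numbers:
--         return d
--     if letters:
--         return a
--     if symbols:
--         return a + s
--     if others:
--         return len(text) - d - a - s
--     return None
-- ===== Notes on version B (the rewrite author's own statement) =====
-- stated objective: alternative
-- what changed: B makes a single accumulating pass over the text computing the digit/alpha/space counters once and then selects by flag precedence, instead of A's per-branch generator-sum passes (up to three passes in the symbols/others branches).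
import Mathlib
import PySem

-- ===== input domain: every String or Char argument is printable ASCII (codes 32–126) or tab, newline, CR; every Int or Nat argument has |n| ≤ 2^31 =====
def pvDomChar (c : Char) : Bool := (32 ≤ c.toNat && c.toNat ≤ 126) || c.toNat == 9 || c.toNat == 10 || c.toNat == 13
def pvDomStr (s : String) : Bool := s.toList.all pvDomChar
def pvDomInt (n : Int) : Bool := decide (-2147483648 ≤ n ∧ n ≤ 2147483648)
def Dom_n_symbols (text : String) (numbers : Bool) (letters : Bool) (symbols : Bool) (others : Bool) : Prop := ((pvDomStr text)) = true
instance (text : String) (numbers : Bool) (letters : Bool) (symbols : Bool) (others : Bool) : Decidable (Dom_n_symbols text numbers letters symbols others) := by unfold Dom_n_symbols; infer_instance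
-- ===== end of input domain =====

-- B replaces A's per-branch generator-sum passes with one accumulating pass over the text plus flag dispatch (alternative decomposition, same O(n) cost).


-- ===== PORT A =====
-- sum(P(c) for c in text): the generator-sum over one predicate, a separate pass per branch, as in A
def pvSumIf (p : Char → Bool) (cs : List Char) : Int :=
  (cs.map (fun c => if p c then (1 : Int) else 0)).sum

def n_symbols (text : String) (numbers : Bool) (letters : Bool) (symbols : Bool) (others : Bool) : Option Int :=
  if numbers then
    some (pvSumIf PySem.Chars.isdigit text.toList)
  else if letters then
    some (pvSumIf PySem.Chars.isalpha text.toList)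
  else if symbols then
    some (pvSumIf PySem.Chars.isalpha text.toList + pvSumIf PySem.Chars.isspace text.toList)
  else if others then
    let numbers' := pvSumIf PySem.Chars.isdigit text.toList
    let words := pvSumIf PySem.Chars.isalpha text.toList
    let spaces := pvSumIf PySem.Chars.isspace text.toList
    some ((text.toList.length : Int) - numbers' - words - spaces)
  else
    none

-- ===== PORT B =====
-- single pass: one fold accumulating the three counters (d, a, s) at once
def pvStep (t : Int × Int × Int) (c : Char) : Int × Int × Int :=
  (t.1 + (if PySem.Chars.isdigit c then 1 else 0),
   t.2.1 + (if PySem.Chars.isalpha c then 1 else 0),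
   t.2.2 + (if PySem.Chars.isspace c then 1 else 0))

def n_symbols_alt (text : String) (numbers : Bool) (letters : Bool) (symbols : Bool) (others : Bool) : Option Int :=
  let t := text.toList.foldl pvStep (0, 0, 0)
  if numbers then some t.1
  else if letters then some t.2.1
  else if symbols then some (t.2.1 + t.2.2)
  else if others then some ((text.toList.length : Int) - t.1 - t.2.1 - t.2.2)
  else none

-- ===== PRECONDITION & SPEC =====
def Spec_n_symbols (text : String) (numbers : Bool) (letters : Bool) (symbols : Bool) (others : Bool) (out : Option Int) : Prop := out = n_symbols_alt text numbers letters symbols others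
instance (text : String) (numbers : Bool) (letters : Bool) (symbols : Bool) (others : Bool) (out : Option Int) : Decidable (Spec_n_symbols text numbers letters symbols others out) := by unfold Spec_n_symbols; infer_instance

-- ===== CLAIM =====
def Claim_equal_n_symbols : Prop := ∀ (text : String) (numbers : Bool) (letters : Bool) (symbols : Bool) (others : Bool), Dom_n_symbols text numbers letters symbols others → Spec_n_symbols text numbers letters symbols others (n_symbols text numbers letters symbols others)

-- ===== LEMMAS AND PROOFS =====
theorem pvFold_eq (cs : List Char) : ∀ (d a s : Int),
    cs.foldl pvStep (d, a, s)
      = (d + pvSumIf PySem.Chars.isdigit cs,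
         a + pvSumIf PySem.Chars.isalpha cs,
         s + pvSumIf PySem.Chars.isspace cs) := by
  induction cs with
  | nil => intro d a s; simp [pvSumIf]
  | cons c cs ih =>
      intro d a s
      simp only [List.foldl_cons, pvStep, ih, pvSumIf, List.map_cons, List.sum_cons]
      refine Prod.ext ?_ (Prod.ext ?_ ?_) <;> simp <;> ring

theorem n_symbols_spec : Claim_equal_n_symbols := by
  intro text numbers letters symbols others _
  unfold Spec_n_symbols n_symbols n_symbols_alt
  rw [pvFold_eq text.toList 0 0 0]
  split_ifs <;> simp
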